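-- pv_equiv track=rewrite | github.com/garma-a/neetcode-submissions | Data Structures & Algorithms/valid-sudoku/submission-4.py | isValidSquare
-- ===== SOURCE A (Python) =====
-- from typing import List
--
-- def isValidSquare(arr: List[List[str]], rowIndex, colIndex) -> bool:
--     st = set()
--     row_start, row_end, col_start, col_end = (
--         rowIndex,
--         rowIndex + 3,
--         colIndex,
--         colIndex + 3,
--     )
--     for row in range(row_start, row_end):
--         for col in range(col_start, col_end):
--             current_ch = arr[row][col]
--             if current_ch != ".":
--                 if current_ch not in st:
--                     st.add(current_ch)
--                 else:
--                     return False
--     return True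
-- ===== SOURCE B (Python) =====
-- def isValidSquare(arr, rowIndex, colIndex):
--     cells = [arr[r][c] for r in range(rowIndex, rowIndex + 3)
--                        for c in range(colIndex, colIndex + 3)]
--     return all(cells[i] == "." or cells[i] != cells[j]
--                for i in range(len(cells))
--                for j in range(i + 1, len(cells)))
-- ===== Notes on version B (the rewrite author's own statement) =====
-- stated objective: alternative
-- what changed: Drops the mutable set and online duplicate detection entirely: B gathers the nine cells and then does a brute-force all-pairs comparison (every i<j pair), declaring the block valid iff no two equal non-'.' cells exist.
-- outside the precondition, e.g. on isValidSquare([['1', '1']], 0, 0): A returns False, B raises IndexError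
import Mathlib
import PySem

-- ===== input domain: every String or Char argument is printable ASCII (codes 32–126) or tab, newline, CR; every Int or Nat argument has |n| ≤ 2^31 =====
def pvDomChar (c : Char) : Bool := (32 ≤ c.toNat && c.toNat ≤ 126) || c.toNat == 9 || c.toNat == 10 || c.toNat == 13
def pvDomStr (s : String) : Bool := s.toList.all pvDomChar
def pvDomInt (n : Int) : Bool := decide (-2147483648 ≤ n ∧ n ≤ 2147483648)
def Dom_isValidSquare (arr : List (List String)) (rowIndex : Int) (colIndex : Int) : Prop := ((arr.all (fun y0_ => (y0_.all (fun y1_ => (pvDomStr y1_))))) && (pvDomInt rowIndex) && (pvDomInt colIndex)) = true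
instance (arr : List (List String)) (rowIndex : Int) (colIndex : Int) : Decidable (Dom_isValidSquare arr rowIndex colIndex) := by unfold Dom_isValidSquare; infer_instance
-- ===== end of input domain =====

-- B replaces A's online set-based duplicate detection by a gather of the nine cells followed by a
-- brute-force all-pairs comparison; equivalence is over the return value on inputs where all 9 block
-- accesses are in range.

-- ===== PORT A =====
-- inner loop 'for col in range(col_start, col_end)': none = returned False (or IndexError, outside Pre_)
def pvAcols (row : List String) (cols : List Int) (st : PySem.Set String) : Option (PySem.Set String) :=
  match cols with
  | [] => some st
  | c :: rest =>
    match PySem.List.pyGet? row c with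
    | none => none  -- IndexError; excluded by Pre_
    | some ch =>
      if ch ≠ "." then
        if ¬ (PySem.Set.contains st ch) then pvAcols row rest (PySem.Set.add st ch)
        else none
      else pvAcols row rest st

-- outer loop 'for row in range(row_start, row_end)'
def pvArows (arr : List (List String)) (rows : List Int) (cols : List Int) (st : PySem.Set String) : Bool :=
  match rows with
  | [] => true
  | r :: rest =>
    match PySem.List.pyGet? arr r with
    | none => false  -- IndexError; excluded by Pre_
    | some row =>
      match pvAcols row cols st with
      | none => false
      | some st' => pvArows arr rest cols st'

def isValidSquare (arr : List (List String)) (rowIndex : Int) (colIndex : Int) : Bool :=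
  pvArows arr (PySem.List.pyRange rowIndex (rowIndex + 3) 1) (PySem.List.pyRange colIndex (colIndex + 3) 1) PySem.Set.empty

-- ===== PORT B =====
-- the comprehension: ALL nine cells of the block, row-major ('.' kept); the '.getD "."' default is
-- reached only outside Pre_ (it merely makes the port total where Python raises IndexError)
def pvCells (arr : List (List String)) (rows cols : List Int) : List String :=
  rows.flatMap (fun r => cols.map (fun c =>
    ((PySem.List.pyGet? arr r).bind (fun row => PySem.List.pyGet? row c)).getD "."))

-- 'all(cells[i] == "." or cells[i] != cells[j] for i in range(len(cells)) for j in range(i+1, len(cells)))'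
def isValidSquare_alt (arr : List (List String)) (rowIndex : Int) (colIndex : Int) : Bool :=
  let cells := pvCells arr (PySem.List.pyRange rowIndex (rowIndex + 3) 1)
                          (PySem.List.pyRange colIndex (colIndex + 3) 1)
  (PySem.List.pyRange 0 (cells.length : Int) 1).all (fun i =>
    (PySem.List.pyRange (i + 1) (cells.length : Int) 1).all (fun j =>
      (PySem.List.pyGetD cells i "" == ".") ||
      (PySem.List.pyGetD cells i "" != PySem.List.pyGetD cells j "")))

-- ===== PRECONDITION & SPEC =====
-- Pre_ excludes exactly the inputs on which some of the 9 block accesses raises IndexError: there A may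
-- raise, or return False early before reaching the bad index, while B (which always reads all 9 cells)
-- raises IndexError.
def Pre_isValidSquare (arr : List (List String)) (rowIndex : Int) (colIndex : Int) : Prop :=
  ∀ r ∈ PySem.List.pyRange rowIndex (rowIndex + 3) 1,
    PySem.Raise.InRange arr.length r ∧
    ∀ c ∈ PySem.List.pyRange colIndex (colIndex + 3) 1,
      PySem.Raise.InRange ((PySem.List.pyGet? arr r).getD []).length c

instance (arr : List (List String)) (rowIndex : Int) (colIndex : Int) : Decidable (Pre_isValidSquare arr rowIndex colIndex) := by
  unfold Pre_isValidSquare; infer_instance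

def pvWitness_isValidSquare : List (List String) × Int × Int :=
  ([["1", "2", "3"], ["4", "5", "6"], ["7", "8", "."]], 0, 0)

def Spec_isValidSquare (arr : List (List String)) (rowIndex : Int) (colIndex : Int) (out : Bool) : Prop := out = isValidSquare_alt arr rowIndex colIndex
instance (arr : List (List String)) (rowIndex : Int) (colIndex : Int) (out : Bool) : Decidable (Spec_isValidSquare arr rowIndex colIndex out) := by unfold Spec_isValidSquare; infer_instance

-- ===== CLAIM (what is proved, stated in full; the proofs are below) =====
def Claim_equal_isValidSquare : Prop := ∀ (arr : List (List String)) (rowIndex : Int) (colIndex : Int), Dom_isValidSquare arr rowIndex colIndex → Pre_isValidSquare arr rowIndex colIndex → Spec_isValidSquare arr rowIndex colIndex (isValidSquare arr rowIndex colIndex)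

-- ===== LEMMAS AND PROOFS =====

-- flat online duplicate checker: A's loop body over the already-gathered list
def pvStep (l : List String) (st : PySem.Set String) : Option (PySem.Set String) :=
  match l with
  | [] => some st
  | x :: xs => if PySem.Set.contains st x then none else pvStep xs (PySem.Set.add st x)

-- the non-'.' cells A's loop inspects in one row (proof-only abbreviation)
def pvE (row : List String) (cols : List Int) : List String :=
  cols.filterMap (fun c =>
    match PySem.List.pyGet? row c with
    | none => none
    | some ch => if ch ≠ "." then some ch else none)

-- A's gathered list (proof-only; mirrors pvCells but filtered)
def pvGather (arr : List (List String)) (rows cols : List Int) : List String :=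
  rows.flatMap (fun r => pvE ((PySem.List.pyGet? arr r).getD []) cols)

lemma pvAcols_eq_pvStep (row : List String) (cols : List Int) (st : PySem.Set String)
    (h : ∀ c ∈ cols, (PySem.List.pyGet? row c).isSome) :
    pvAcols row cols st = pvStep (pvE row cols) st := by
  induction cols generalizing st with
  | nil => rfl
  | cons c rest ih =>
    obtain ⟨ch, hch⟩ := Option.isSome_iff_exists.mp (h c (List.mem_cons_self ..))
    have hrest : ∀ c' ∈ rest, (PySem.List.pyGet? row c').isSome :=
      fun c' hc' => h c' (List.mem_cons_of_mem _ hc')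
    by_cases hdot : ch = "."
    · subst hdot
      simpa [pvAcols, pvE, hch] using ih st hrest
    · by_cases hm : ch ∈ st
      · simp [pvAcols, pvE, hch, hdot, hm, pvStep]
      · have hc : PySem.Set.contains st ch = false := by
          rw [← Bool.not_eq_true]; exact fun hcc => hm ((PySem.Set.contains_iff st ch).mp hcc)
        simpa [pvAcols, pvE, hch, hdot, hc, hm, pvStep] using ih (PySem.Set.add st ch) hrest

lemma pvStep_append (a b : List String) (st : PySem.Set String) :
    pvStep (a ++ b) st = (pvStep a st).bind (fun st' => pvStep b st') := by
  induction a generalizing st with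
  | nil => rfl
  | cons x xs ih =>
    simp only [List.cons_append, pvStep]
    by_cases h : PySem.Set.contains st x = true
    · simp only [h, if_true, Option.bind_none]
    · simp only [Bool.not_eq_true] at h
      simp only [h, Bool.false_eq_true, if_false, ih]

lemma pvArows_eq_pvStep (arr : List (List String)) (rows cols : List Int) (st : PySem.Set String)
    (h : ∀ r ∈ rows, ∃ row, PySem.List.pyGet? arr r = some row ∧
          ∀ c ∈ cols, (PySem.List.pyGet? row c).isSome) :
    pvArows arr rows cols st = (pvStep (pvGather arr rows cols) st).isSome := by
  induction rows generalizing st with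
  | nil => rfl
  | cons r rest ih =>
    obtain ⟨row, hrow, hcols⟩ := h r (List.mem_cons_self ..)
    have hrest : ∀ r' ∈ rest, ∃ row', PySem.List.pyGet? arr r' = some row' ∧
        ∀ c ∈ cols, (PySem.List.pyGet? row' c).isSome :=
      fun r' hr' => h r' (List.mem_cons_of_mem _ hr')
    have hg : pvGather arr (r :: rest) cols = pvE row cols ++ pvGather arr rest cols := by
      simp [pvGather, hrow]
    rw [hg, pvStep_append]
    simp only [pvArows, hrow, pvAcols_eq_pvStep row cols st hcols]
    cases hps : pvStep (pvE row cols) st with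
    | none => simp
    | some st' => simp [ih st' hrest]

lemma pvStep_isSome_iff (l : List String) (st : PySem.Set String) :
    (pvStep l st).isSome = true ↔ l.Nodup ∧ ∀ x ∈ l, x ∉ st := by
  induction l generalizing st with
  | nil => simp [pvStep]
  | cons x xs ih =>
    by_cases hm : x ∈ st
    · simp only [pvStep, (PySem.Set.contains_iff st x).mpr hm, if_true, Option.isSome_none,
        Bool.false_eq_true, false_iff, not_and]
      intro _ hall
      exact absurd hm (hall x (List.mem_cons_self ..))
    · have hcont : PySem.Set.contains st x = false := by
        rw [← Bool.not_eq_true]; exact fun hc => hm ((PySem.Set.contains_iff st x).mp hc)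
      simp only [pvStep, hcont, Bool.false_eq_true, if_false, ih, List.nodup_cons, List.mem_cons]
      constructor
      · rintro ⟨hnd, hall⟩
        have hx : x ∉ xs := by
          intro hx
          exact (hall x hx) ((PySem.Set.mem_add st x x).mpr (Or.inr rfl))
        refine ⟨⟨hx, hnd⟩, ?_⟩
        rintro y (rfl | hy)
        · exact hm
        · intro hmem
          exact (hall y hy) ((PySem.Set.mem_add st x y).mpr (Or.inl hmem))
      · rintro ⟨⟨hx, hnd⟩, hall⟩
        refine ⟨hnd, fun y hy hmem => ?_⟩
        rcases (PySem.Set.mem_add st x y).mp hmem with h' | rfl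
        · exact (hall y (Or.inr hy)) h'
        · exact hx hy

-- A's gathered list is the filter of B's full cell list
lemma pvE_eq_filter (row : List String) (cols : List Int)
    (h : ∀ c ∈ cols, (PySem.List.pyGet? row c).isSome) :
    pvE row cols =
      (cols.map (fun c => (PySem.List.pyGet? row c).getD ".")).filter (fun s => s != ".") := by
  induction cols with
  | nil => rfl
  | cons c cs ihc =>
    obtain ⟨ch, hch⟩ := Option.isSome_iff_exists.mp (h c (List.mem_cons_self ..))
    have hcs := fun c' hc' => h c' (List.mem_cons_of_mem _ hc')
    by_cases hdot : ch = "."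
    · subst hdot
      simpa [pvE, hch, List.filter] using ihc hcs
    · simpa [pvE, hch, hdot, List.filter] using ihc hcs

lemma pvGather_eq_filter (arr : List (List String)) (rows cols : List Int)
    (h : ∀ r ∈ rows, ∃ row, PySem.List.pyGet? arr r = some row ∧
          ∀ c ∈ cols, (PySem.List.pyGet? row c).isSome) :
    pvGather arr rows cols = (pvCells arr rows cols).filter (fun s => s != ".") := by
  induction rows with
  | nil => rfl
  | cons r rest ih =>
    obtain ⟨row, hrow, hcols⟩ := h r (List.mem_cons_self ..)
    have hrest := fun r' hr' => h r' (List.mem_cons_of_mem _ hr')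
    have hg : pvGather arr (r :: rest) cols = pvE row cols ++ pvGather arr rest cols := by
      simp [pvGather, hrow]
    have hc : pvCells arr (r :: rest) cols =
        (cols.map (fun c => (PySem.List.pyGet? row c).getD ".")) ++ pvCells arr rest cols := by
      simp [pvCells, hrow]
    rw [hg, hc, List.filter_append, ih hrest, pvE_eq_filter row cols hcols]

-- all-pairs index loop over a list = Pairwise
lemma all_pairs_iff (l : List String) (p : String → String → Bool) :
    ((PySem.List.pyRange 0 (l.length : Int) 1).all (fun i =>
      (PySem.List.pyRange (i + 1) (l.length : Int) 1).all (fun j =>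
        p (PySem.List.pyGetD l i "") (PySem.List.pyGetD l j "")))) = true ↔
    l.Pairwise (fun a b => p a b = true) := by
  rw [List.pairwise_iff_getElem]
  simp only [List.all_eq_true, PySem.List.mem_pyRange_one]
  constructor
  · intro h i j hi hj hij
    have h1 := h (i : Int) ⟨by omega, by exact_mod_cast hi⟩ (j : Int) ⟨by omega, by exact_mod_cast hj⟩
    rw [PySem.List.pyGetD_eq_getElem l "" (by omega) (by exact_mod_cast hi),
        PySem.List.pyGetD_eq_getElem l "" (by omega) (by exact_mod_cast hj)] at h1
    simpa using h1
  · intro h i ⟨hi0, hin⟩ j ⟨hji, hjn⟩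
    rw [PySem.List.pyGetD_eq_getElem l "" hi0 hin,
        PySem.List.pyGetD_eq_getElem l "" (by omega) hjn]
    exact h i.toNat j.toNat (by omega) (by omega) (by omega)

-- pairwise all-pairs predicate ↔ Nodup of the non-'.' filter
lemma pairwise_iff_nodup_filter (l : List String) :
    l.Pairwise (fun a b => ((a == ".") || (a != b)) = true) ↔
    (l.filter (fun s => s != ".")).Nodup := by
  rw [List.Nodup, List.pairwise_filter]
  constructor
  · refine fun h => h.imp ?_
    intro a b hab ha hb
    simp only [Bool.or_eq_true, beq_iff_eq, bne_iff_ne] at hab ha hb ⊢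
    rcases hab with h' | h'
    · exact absurd h' ha
    · exact h'
  · refine fun h => h.imp ?_
    intro a b hab
    simp only [Bool.or_eq_true, beq_iff_eq, bne_iff_ne]
    by_cases ha : a = "."
    · exact Or.inl ha
    · by_cases hb : b = "."
      · exact Or.inr (fun he => ha (he ▸ hb))
      · exact Or.inr (hab (by simpa using ha) (by simpa using hb))

-- ===== VERDICT (by name: the statement is the Claim_ definition above) =====
theorem isValidSquare_spec : Claim_equal_isValidSquare := by
  intro arr rowIndex colIndex _hdom hpre
  unfold Spec_isValidSquare isValidSquare isValidSquare_alt
  have h : ∀ r ∈ PySem.List.pyRange rowIndex (rowIndex + 3) 1,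
      ∃ row, PySem.List.pyGet? arr r = some row ∧
        ∀ c ∈ PySem.List.pyRange colIndex (colIndex + 3) 1, (PySem.List.pyGet? row c).isSome := by
    intro r hr
    obtain ⟨hin, hcols⟩ := hpre r hr
    have hsome : (PySem.List.pyGet? arr r).isSome := by
      rw [Option.isSome_iff_ne_none]
      intro hn
      exact (PySem.List.pyGet?_eq_none_iff arr r).mp hn hin
    obtain ⟨row, hrow⟩ := Option.isSome_iff_exists.mp hsome
    refine ⟨row, hrow, fun c hc => ?_⟩
    have hcin := hcols c hc
    rw [hrow] at hcin
    simp only [Option.getD_some] at hcin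
    rw [Option.isSome_iff_ne_none]
    intro hn
    exact (PySem.List.pyGet?_eq_none_iff row c).mp hn hcin
  rw [pvArows_eq_pvStep arr _ _ _ h, Bool.eq_iff_iff, pvStep_isSome_iff,
      pvGather_eq_filter arr _ _ h]
  constructor
  · rintro ⟨hnd, -⟩
    exact (all_pairs_iff _ (fun a b => (a == ".") || (a != b))).mpr
      ((pairwise_iff_nodup_filter _).mpr hnd)
  · intro hb
    refine ⟨(pairwise_iff_nodup_filter _).mp
      ((all_pairs_iff _ (fun a b => (a == ".") || (a != b))).mp hb), ?_⟩
    simp [PySem.Set.empty]
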